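-- pv_equiv track=rewrite | github.com/yitinw9/CS171 | Final_project/python_chat/Proj1.py | getSentenceParse
-- ===== SOURCE A (Python) =====
-- def getSentenceParse(T):
--     sentenceTrees = {k: v for k, v in T.items() if k.startswith(
--         'S/0') or k.startswith('Greeting/0')}
--     completeSentenceTree = ''
--     for key in sentenceTrees.keys():
--         completeSentenceTree = key
--     if completeSentenceTree == '':
--         return None
--     return T[completeSentenceTree]
-- ===== SOURCE B (Python) =====
-- def getSentenceParse(T):
--     for key in reversed(T):
--         if key.startswith('S/0') or key.startswith('Greeting/0'):
--             return T[key]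
--     return None
-- ===== Notes on version B (the rewrite author's own statement) =====
-- stated objective: idiomatic
-- what changed: Instead of building a filtered dict and overwriting a running variable to keep the last matching key, B scans the dict's keys in reverse and returns the value of the first match immediately (no intermediate dict, no accumulator).
import Mathlib
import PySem

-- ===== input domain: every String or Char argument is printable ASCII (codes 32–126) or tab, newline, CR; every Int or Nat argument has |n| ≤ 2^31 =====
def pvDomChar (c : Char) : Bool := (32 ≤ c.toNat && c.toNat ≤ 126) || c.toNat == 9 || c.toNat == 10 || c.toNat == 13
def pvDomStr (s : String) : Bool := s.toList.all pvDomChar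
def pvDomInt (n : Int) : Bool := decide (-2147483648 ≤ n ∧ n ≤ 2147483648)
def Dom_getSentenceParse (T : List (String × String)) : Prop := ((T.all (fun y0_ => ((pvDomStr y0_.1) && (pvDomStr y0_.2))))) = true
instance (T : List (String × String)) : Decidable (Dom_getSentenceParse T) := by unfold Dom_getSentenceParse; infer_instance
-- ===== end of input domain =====

-- B iterates the dict's keys in reverse and returns the first match's value directly
-- (no intermediate filtered dict, no running last-key variable): simpler decomposition, same cost.

-- the key filter k.startswith('S/0') or k.startswith('Greeting/0'), shared by both ports
def pvCond (k : String) : Bool :=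
  PySem.Str.startswith k "S/0" || PySem.Str.startswith k "Greeting/0"

-- ===== PORT A =====
def getSentenceParse (T : List (String × String)) : Option String :=
  let d := PySem.Dict.ofList T
  -- dict comprehension over T.items() keeping matching keys
  let sentenceTrees := d.items.foldl
    (fun acc kv => if pvCond kv.1 then acc.insert kv.1 kv.2 else acc) PySem.Dict.empty
  -- for key in sentenceTrees.keys(): completeSentenceTree = key
  let completeSentenceTree := sentenceTrees.keys.foldl (fun _ k => k) ""
  if completeSentenceTree = "" then none
  else d.get? completeSentenceTree   -- T[completeSentenceTree]; the key is always present here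

-- ===== PORT B =====
-- for key in reversed(T): if key matches: return T[key]
def pvAltLoop (d : PySem.Dict String String) : List String → Option String
  | [] => none
  | k :: ks => if pvCond k then d.get? k else pvAltLoop d ks

def getSentenceParse_alt (T : List (String × String)) : Option String :=
  let d := PySem.Dict.ofList T
  pvAltLoop d d.keys.reverse

-- ===== PRECONDITION & SPEC =====
def Spec_getSentenceParse (T : List (String × String)) (out : Option String) : Prop := out = getSentenceParse_alt T
instance (T : List (String × String)) (out : Option String) : Decidable (Spec_getSentenceParse T out) := by unfold Spec_getSentenceParse; infer_instance

-- ===== CLAIM (what is proved, stated in full; the proofs are below) =====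
def Claim_equal_getSentenceParse : Prop := ∀ (T : List (String × String)), Dom_getSentenceParse T → Spec_getSentenceParse T (getSentenceParse T)

-- ===== LEMMAS AND PROOFS =====

-- a matching key is nonempty
theorem pvCond_ne_empty {k : String} (h : pvCond k = true) : k ≠ "" := by
  intro he; subst he
  simp [pvCond, PySem.Str.startswith, PySem.Chars.startswith] at h

-- the "keep the last seen" fold is getLast?
theorem foldl_last (ks : List String) (a : String) :
    ks.foldl (fun _ k => k) a = ks.getLast?.getD a := by
  induction ks generalizing a with
  | nil => rfl
  | cons x xs ih =>
    cases xs with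
    | nil => rfl
    | cons y ys => simpa using ih y

-- first match of find? is head of filter
theorem find?_eq_head_filter (p : String → Bool) (l : List String) :
    l.find? p = (l.filter p).head? := by
  induction l with
  | nil => rfl
  | cons x xs ih =>
    by_cases h : p x = true
    · simp [List.find?_cons_of_pos h, List.filter_cons_of_pos h]
    · simp only [Bool.not_eq_true] at h
      rw [List.find?_cons_of_neg (by simp [h]), List.filter_cons_of_neg (by simp [h]), ih]

-- keys of the conditional-insert loop, for fresh distinct keys: the filtered keys get appended
theorem keys_cond_foldl (L : List (String × String)) (acc : PySem.Dict String String)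
    (hfresh : ∀ kv ∈ L, acc.contains kv.1 = false) (hnd : (L.map Prod.fst).Nodup) :
    (L.foldl (fun acc kv => if pvCond kv.1 then acc.insert kv.1 kv.2 else acc) acc).keys
      = acc.keys ++ (L.filter (fun kv => pvCond kv.1)).map Prod.fst := by
  induction L generalizing acc with
  | nil => simp
  | cons kv rest ih =>
    simp only [List.map_cons, List.nodup_cons] at hnd
    by_cases h : pvCond kv.1 = true
    · have hk : acc.contains kv.1 = false := hfresh kv (by simp)
      have hfresh' : ∀ p ∈ rest, (acc.insert kv.1 kv.2).contains p.1 = false := by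
        intro p hp
        rw [PySem.Dict.contains_insert]
        have h1 : (p.1 == kv.1) = false := by
          simp only [beq_eq_false_iff_ne, ne_eq]
          intro he
          exact hnd.1 (he ▸ List.mem_map_of_mem hp)
        simp [h1, hfresh p (List.mem_cons_of_mem _ hp)]
      rw [List.foldl_cons]
      simp only [h, if_pos]
      rw [ih _ hfresh' hnd.2, PySem.Dict.keys_insert_of_not_contains _ _ hk]
      simp [h]
    · simp only [Bool.not_eq_true] at h
      rw [List.foldl_cons]
      simp only [h, Bool.false_eq_true, ite_false]
      rw [ih _ (fun p hp => hfresh p (List.mem_cons_of_mem _ hp)) hnd.2]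
      simp [h]
  
-- B's loop is find? then lookup
theorem pvAltLoop_eq (d : PySem.Dict String String) (ks : List String) :
    pvAltLoop d ks = match ks.find? pvCond with
                     | none => none
                     | some k => d.get? k := by
  induction ks with
  | nil => rfl
  | cons x xs ih =>
    by_cases h : pvCond x = true
    · simp [pvAltLoop, h, List.find?]
    · simp only [Bool.not_eq_true] at h
      simp [pvAltLoop, h, List.find?, ih]

-- ===== VERDICT (by name: the statement is the Claim_ definition above) =====
theorem getSentenceParse_spec : Claim_equal_getSentenceParse := by
  intro T _
  unfold Spec_getSentenceParse getSentenceParse getSentenceParse_alt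
  simp only []
  set d := PySem.Dict.ofList T with hd
  have hnd : d.keys.Nodup := PySem.Dict.nodup_keys_ofList T
  have hkeys := keys_cond_foldl d.items PySem.Dict.empty
      (fun kv _ => PySem.Dict.contains_empty kv.1)
      (by simpa [PySem.Dict.keys] using hnd)
  rw [hkeys, foldl_last, pvAltLoop_eq]
  have hmap : (d.items.filter (fun kv => pvCond kv.1)).map Prod.fst
      = (d.items.map Prod.fst).filter pvCond := by
    induction d.items with
    | nil => rfl
    | cons x xs ih =>
      by_cases h : pvCond x.1 = true
      · simp [h, ih]
      · simp only [Bool.not_eq_true] at h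
        simp [h, ih]
  have hk : d.keys = d.items.map Prod.fst := rfl
  rw [find?_eq_head_filter, List.filter_reverse, List.head?_reverse]
  simp only [PySem.Dict.keys_empty, List.nil_append, hmap, ← hk]
  cases hlast : (d.keys.filter pvCond).getLast? with
  | none => simp
  | some k =>
    have hkmem : k ∈ d.keys.filter pvCond := List.mem_of_getLast? hlast
    have hcond : pvCond k = true := (List.mem_filter.mp hkmem).2
    simp [pvCond_ne_empty hcond]
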